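-- pv_equiv track=rewrite | github.com/Phlair/civ7-modding-tools | src/civ7_modding_tools/utils/__init__.py | start_case
-- ===== SOURCE A (Python) =====
-- def start_case(name: str) -> str:
--     """
--     Convert camelCase to Start Case (space-separated title case).
--
--     Examples:
--         civilizationType -> Civilization Type
--         myProperty -> My Property
--
--     Args:
--         name: camelCase string
--
--     Returns:
--         Space-separated title case string
--     """
--     if not name:
--         return name
--
--     result = [name[0].upper()]  # Capitalize first letter
--     for i, char in enumerate(name[1:], 1):
--         if char.isupper():
--             result.append(" ")
--         result.append(char)
--     return "".join(result)
-- ===== SOURCE B (Python) =====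
-- def _segments(cs: str) -> list:
--     # split cs into consecutive word segments, each new segment starting
--     # at an uppercase character (the first segment starts at index 0)
--     out = []
--     while cs:
--         rest = cs[1:]
--         k = 0
--         while k < len(rest) and not rest[k].isupper():
--             k += 1
--         out.append(cs[0] + rest[:k])
--         cs = rest[k:]
--     return out
--
--
-- def start_case(name: str) -> str:
--     if not name:
--         return name
--     joined = " ".join(_segments(name))
--     return joined[0].upper() + joined[1:]
-- ===== Notes on version B (the rewrite author's own statement) =====
-- stated objective: alternative
-- what changed: B segments the string into maximal words (recursive span scan: each segment runs until the next uppercase char), joins the segments with spaces and uppercases only the first character of the result, instead of A's single char-by-char loop that emits a space before every uppercase char.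
import Mathlib
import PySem

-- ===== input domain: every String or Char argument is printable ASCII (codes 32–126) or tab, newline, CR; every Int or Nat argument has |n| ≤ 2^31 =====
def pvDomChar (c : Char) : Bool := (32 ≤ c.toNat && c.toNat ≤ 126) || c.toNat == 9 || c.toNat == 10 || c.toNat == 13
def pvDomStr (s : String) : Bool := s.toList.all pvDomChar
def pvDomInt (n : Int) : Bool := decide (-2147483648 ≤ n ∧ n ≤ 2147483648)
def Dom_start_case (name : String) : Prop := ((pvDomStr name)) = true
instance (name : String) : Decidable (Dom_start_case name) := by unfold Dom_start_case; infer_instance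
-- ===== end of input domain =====

-- B: segments the string into maximal words (span scan until the next uppercase char),
-- joins them with spaces and uppercases only the first character — vs A's per-char loop.


-- ===== PORT A =====
def start_case (name : String) : String :=
  if name = "" then name
  else
    let cs := name.toList
    -- result = [name[0].upper()]; for i, char in enumerate(name[1:], 1): …
    let init := [PySem.Chars.upperChar cs.headI]
    let result := (PySem.List.enumerate (PySem.List.slice cs (some 1) none) 1).foldl
        (fun acc ic =>
          (if PySem.Chars.isupper ic.2 then acc ++ [' '] else acc) ++ [ic.2]) init
    String.ofList result

-- ===== PORT B =====
-- _segments: rest[:k] / rest[k:], with k the scan position of the first uppercase char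
-- of rest, are exactly takeWhile/dropWhile of (not uppercase)
def pvSegments (cs : List Char) : List (List Char) :=
  match cs with
  | [] => []
  | c :: rest =>
      (c :: rest.takeWhile (fun d => !PySem.Chars.isupper d)) ::
        pvSegments (rest.dropWhile (fun d => !PySem.Chars.isupper d))
termination_by cs.length
decreasing_by
  simp only [List.length_cons]
  exact Nat.lt_succ_of_le (List.length_dropWhile_le _ _)

def start_case_alt (name : String) : String :=
  if name = "" then name
  else
    -- joined = " ".join(_segments(name)); joined[0].upper() + joined[1:]
    -- (joined is nonempty here, so joined[0]/joined[1:] are headI/tail)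
    let joined := List.intercalate [' '] (pvSegments name.toList)
    String.ofList (PySem.Chars.upperChar joined.headI :: joined.tail)

-- ===== PRECONDITION & SPEC =====
def Spec_start_case (name : String) (out : String) : Prop := out = start_case_alt name
instance (name : String) (out : String) : Decidable (Spec_start_case name out) := by unfold Spec_start_case; infer_instance

-- ===== CLAIM (what is proved, stated in full; the proofs are below) =====
def Claim_equal_start_case : Prop := ∀ (name : String), Dom_start_case name → Spec_start_case name (start_case name)

-- ===== LEMMAS AND PROOFS =====
def pvF (c : Char) : List Char := if PySem.Chars.isupper c then [' ', c] else [c]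

lemma intercalate_cc (a b : List Char) (t : List (List Char)) :
    List.intercalate [' '] (a :: b :: t) = a ++ [' '] ++ List.intercalate [' '] (b :: t) := by
  simp [List.intercalate, List.intersperse]

lemma foldA (l : List Char) (s : Int) (acc : List Char) :
    (PySem.List.enumerate l s).foldl
      (fun acc ic => (if PySem.Chars.isupper ic.2 then acc ++ [' '] else acc) ++ [ic.2]) acc
      = acc ++ l.flatMap pvF := by
  induction l generalizing s acc with
  | nil => simp [PySem.List.enumerate_nil]
  | cons c t ih =>
      rw [PySem.List.enumerate_cons, List.foldl_cons, ih]
      by_cases h : PySem.Chars.isupper c <;> simp [pvF, h]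

lemma flatMap_id_of_lower (l : List Char) (h : ∀ x ∈ l, PySem.Chars.isupper x = false) :
    l.flatMap pvF = l := by
  induction l with
  | nil => rfl
  | cons c t ih =>
      simp only [List.flatMap_cons, pvF, h c (by simp), ih fun x hx => h x (by simp [hx])]
      rfl

lemma segs_join (n : Nat) : ∀ (l : List Char), l.length ≤ n → ∀ c,
    List.intercalate [' '] (pvSegments (c :: l)) = c :: l.flatMap pvF := by
  induction n with
  | zero =>
      intro l hl c
      have : l = [] := List.eq_nil_of_length_eq_zero (Nat.le_zero.mp hl)
      subst this
      simp [pvSegments, List.intercalate]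
  | succ n ih =>
      intro l hl c
      rw [pvSegments]
      rcases hdrop : l.dropWhile (fun d => !PySem.Chars.isupper d) with _ | ⟨d, l'⟩
      · have htake : l.takeWhile (fun d => !PySem.Chars.isupper d) = l := by
          have := List.takeWhile_append_dropWhile (p := fun d => !PySem.Chars.isupper d) (l := l)
          rw [hdrop] at this; simpa using this
        have hall : ∀ x ∈ l, PySem.Chars.isupper x = false := by
          intro x hx
          have := List.mem_takeWhile_imp (htake ▸ hx)
          simpa using this
        simp [htake, pvSegments, List.intercalate, flatMap_id_of_lower l hall]
      · have hd : PySem.Chars.isupper d = true := by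
          have hne : l.dropWhile (fun d => !PySem.Chars.isupper d) ≠ [] := by simp [hdrop]
          have := List.head_dropWhile_not (p := fun d => !PySem.Chars.isupper d) (l := l) hne
          simpa [hdrop] using this
        have hdec : l'.length ≤ n := by
          have h1 := List.length_dropWhile_le (p := fun d => !PySem.Chars.isupper d) (l := l)
          rw [hdrop] at h1
          simp only [List.length_cons] at h1
          omega
        have hsplit : l = l.takeWhile (fun d => !PySem.Chars.isupper d) ++ d :: l' := by
          conv_lhs => rw [← List.takeWhile_append_dropWhile (p := fun d => !PySem.Chars.isupper d) (l := l)]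
          rw [hdrop]
        have htl : ∀ x ∈ l.takeWhile (fun d => !PySem.Chars.isupper d),
            PySem.Chars.isupper x = false := by
          intro x hx
          have := List.mem_takeWhile_imp hx
          simpa using this
        have ihd := ih l' hdec d
        have hseg : pvSegments (d :: l') =
            (d :: l'.takeWhile (fun d => !PySem.Chars.isupper d)) ::
              pvSegments (l'.dropWhile (fun d => !PySem.Chars.isupper d)) := by
          rw [pvSegments]
        rw [hseg, intercalate_cc, ← hseg, ihd]
        conv_rhs => rw [hsplit]
        rw [List.flatMap_append, flatMap_id_of_lower _ htl]
        simp [pvF, hd]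

-- ===== VERDICT (by name: the statement is the Claim_ definition above) =====
theorem start_case_spec : Claim_equal_start_case := by
  intro name _
  unfold Spec_start_case start_case start_case_alt
  by_cases h : name = ""
  · simp [h]
  · have hne : name.toList ≠ [] := by
      intro hl
      exact h (String.toList_eq_nil_iff.mp hl)
    obtain ⟨c, rest, hcr⟩ := List.exists_cons_of_ne_nil hne
    simp only [if_neg h, hcr, PySem.List.slice_from_one, List.tail_cons, List.headI_cons]
    rw [foldA, segs_join rest.length rest le_rfl c]
    simp
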